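-- pv_equiv track=rewrite | github.com/jmegner/CheckioPuzzles | cipher-crossword.py | makeLetterGrid
-- ===== SOURCE A (Python) =====
-- def makeLetterGrid(horizWords, vertWords):
--     letterGrid = []
--
--     for r in range(2 * len(horizWords) - 1):
--         if r % 2 == 0:
--             letterGrid.append(list(horizWords[r // 2]))
--         else:
--             letterGrid.append([])
--
--             for c in range(2 * len(vertWords) - 1):
--                 if c % 2 == 0:
--                     letterGrid[-1].append(vertWords[c // 2][r])
--                 else:
--                     letterGrid[-1].append(' ')
--
--     return letterGrid
-- ===== SOURCE B (Python) =====
-- def makeLetterGrid(horizWords, vertWords):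
--     cols = 2 * len(vertWords) - 1
--     # allocate: even rows from the horizontal words, blank separator rows between them
--     grid = []
--     for hw in horizWords:
--         if grid:
--             grid.append([' '] * cols)
--         grid.append(list(hw))
--     # scatter: drop each vertical word's letter into its column of every separator row
--     for i in range(len(horizWords) - 1):
--         r = 2 * i + 1
--         for j in range(len(vertWords)):
--             grid[r][2 * j] = vertWords[j][r]
--     return grid
-- ===== Notes on version B (the rewrite author's own statement) =====
-- stated objective: alternative
-- what changed: Replaces the single parity-branched nested loop with an allocate-then-scatter pair: first build even rows and blank separator rows by interleaving, then fill the separator rows in place by writing each vertical word's letter into its column.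
import Mathlib
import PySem

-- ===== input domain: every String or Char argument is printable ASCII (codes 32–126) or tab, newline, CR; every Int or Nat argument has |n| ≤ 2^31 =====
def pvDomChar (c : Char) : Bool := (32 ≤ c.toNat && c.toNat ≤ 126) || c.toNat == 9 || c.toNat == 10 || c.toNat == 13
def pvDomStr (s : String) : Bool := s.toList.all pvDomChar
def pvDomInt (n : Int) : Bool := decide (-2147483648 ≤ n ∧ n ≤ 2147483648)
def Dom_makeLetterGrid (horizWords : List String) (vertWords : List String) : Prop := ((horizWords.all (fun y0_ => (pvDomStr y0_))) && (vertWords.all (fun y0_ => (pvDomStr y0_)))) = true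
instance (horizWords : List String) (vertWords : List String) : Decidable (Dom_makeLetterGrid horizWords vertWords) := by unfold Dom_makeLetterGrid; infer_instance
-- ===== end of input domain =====

-- B replaces A's single parity-branched nested loop by an allocate-then-scatter pair of passes
-- (interleave even/blank rows, then fill the blank rows in place); alternative decomposition, same cost.

-- ===== PORT A =====
-- cell of a separator row: vertWords[c//2][r] as a 1-character string (getD "" is unreachable under Pre_)
def pvCellA (vertWords : List String) (r c : Int) : String :=
  ((PySem.Str.pyGet? (PySem.List.pyGetD vertWords (PySem.Int.floordiv c 2) "") r).map
    (fun ch => String.ofList [ch])).getD ""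

def makeLetterGrid (horizWords : List String) (vertWords : List String) : List (List String) :=
  (PySem.List.pyRange 0 (2 * (horizWords.length : Int) - 1) 1).foldl
    (fun letterGrid r =>
      if PySem.Int.mod r 2 == 0 then
        letterGrid ++ [(PySem.List.pyGetD horizWords (PySem.Int.floordiv r 2) "").toList.map
          (fun ch => String.ofList [ch])]
      else
        letterGrid ++ [(PySem.List.pyRange 0 (2 * (vertWords.length : Int) - 1) 1).foldl
          (fun row c =>
            if PySem.Int.mod c 2 == 0 then row ++ [pvCellA vertWords r c]
            else row ++ [" "]) []])
    []

-- ===== PORT B =====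
-- cell written by the scatter pass: vertWords[j][r] (j a Nat loop index; getD "" unreachable under Pre_)
def pvCellB (vertWords : List String) (j : Nat) (r : Int) : String :=
  ((PySem.Str.pyGet? (vertWords.getD j "") r).map (fun ch => String.ofList [ch])).getD ""

def makeLetterGrid_alt (horizWords : List String) (vertWords : List String) : List (List String) :=
  let cols : Int := 2 * (vertWords.length : Int) - 1
  -- pass 1: allocate — even rows from the horizontal words, blank rows between them
  let base := horizWords.foldl
    (fun grid hw =>
      (if grid.isEmpty then grid else grid ++ [List.replicate cols.toNat " "]) ++
        [hw.toList.map (fun ch => String.ofList [ch])])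
    []
  -- pass 2: scatter — grid[2i+1][2j] = vertWords[j][2i+1]
  (List.range (horizWords.length - 1)).foldl
    (fun grid i =>
      grid.modify (2 * i + 1)
        (fun row => (List.range vertWords.length).foldl
          (fun row j => row.set (2 * j) (pvCellB vertWords j (2 * (i : Int) + 1))) row))
    base

-- ===== PRECONDITION & SPEC =====
-- Pre_ excludes exactly the inputs on which A raises IndexError: with at least two horizontal
-- words, every vertical word must reach row index 2*len(horizWords)-3, i.e. have length ≥ 2*len(horizWords)-2.
def Pre_makeLetterGrid (horizWords : List String) (vertWords : List String) : Prop :=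
  horizWords.length ≤ 1 ∨ ∀ w ∈ vertWords, 2 * horizWords.length - 2 ≤ w.toList.length
instance (horizWords : List String) (vertWords : List String) : Decidable (Pre_makeLetterGrid horizWords vertWords) := by unfold Pre_makeLetterGrid; infer_instance

def pvWitness_makeLetterGrid : List String × List String := (["ab", "cd"], ["xy", "zw"])

def Spec_makeLetterGrid (horizWords : List String) (vertWords : List String) (out : List (List String)) : Prop := out = makeLetterGrid_alt horizWords vertWords
instance (horizWords : List String) (vertWords : List String) (out : List (List String)) : Decidable (Spec_makeLetterGrid horizWords vertWords out) := by unfold Spec_makeLetterGrid; infer_instance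

-- ===== CLAIM (what is proved, stated in full; the proofs are below) =====
def Claim_equal_makeLetterGrid : Prop := ∀ (horizWords : List String) (vertWords : List String), Dom_makeLetterGrid horizWords vertWords → Pre_makeLetterGrid horizWords vertWords → Spec_makeLetterGrid horizWords vertWords (makeLetterGrid horizWords vertWords)

-- ===== LEMMAS AND PROOFS =====

-- canonical forms
def pvEven (h : List String) (n : Nat) : List String :=
  (h.getD n "").toList.map (fun ch => String.ofList [ch])
def pvBlank (v : List String) : List String := List.replicate (2 * v.length - 1) " "
def pvOddRow (v : List String) (r : Int) : List String :=
  (List.range (2 * v.length - 1)).map (fun c => if c % 2 = 0 then pvCellB v (c / 2) r else " ")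
def pvGrid (h v : List String) : List (List String) :=
  (List.range (2 * h.length - 1)).map (fun n => if n % 2 = 0 then pvEven h (n / 2) else pvOddRow v n)

theorem pvMod2 (k : Nat) : PySem.Int.mod (k : Int) 2 = ((k % 2 : Nat) : Int) := by
  exact_mod_cast PySem.Int.mod_natCast k 2

theorem pvDiv2 (k : Nat) : PySem.Int.floordiv (k : Int) 2 = ((k / 2 : Nat) : Int) := by
  exact_mod_cast PySem.Int.floordiv_natCast k 2

theorem pvCellAB (v : List String) (r : Int) (c : Nat) :
    pvCellA v r (c : Int) = pvCellB v (c / 2) r := by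
  unfold pvCellA pvCellB
  rw [pvDiv2, PySem.List.pyGetD_natCast, List.getD_eq_getElem?_getD]

-- A's inner loop builds pvOddRow
theorem pvInnerA (v : List String) (r : Int) :
    (PySem.List.pyRange 0 (2 * (v.length : Int) - 1) 1).foldl
      (fun row c => if PySem.Int.mod c 2 == 0 then row ++ [pvCellA v r c] else row ++ [" "]) []
    = pvOddRow v r := by
  have hm : ((2 * (v.length : Int) - 1) - 0).toNat = 2 * v.length - 1 := by omega
  rw [PySem.List.pyRange_one, hm, List.foldl_map, pvOddRow,
    ← List.nil_append ((List.range (2 * v.length - 1)).map _),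
    ← PySem.List.foldl_append_singleton_eq_map]
  apply PySem.List.foldl_congr_mem
  intro acc c _
  dsimp only
  rw [zero_add, pvMod2, pvCellAB]
  by_cases hc : c % 2 = 0 <;> simp [hc]
  intro h2; exfalso; omega

theorem A_eq_grid (h v : List String) : makeLetterGrid h v = pvGrid h v := by
  unfold makeLetterGrid pvGrid
  have hn : ((2 * (h.length : Int) - 1) - 0).toNat = 2 * h.length - 1 := by omega
  rw [PySem.List.pyRange_one 0 (2 * (h.length : Int) - 1), hn, List.foldl_map,
    ← List.nil_append ((List.range (2 * h.length - 1)).map _),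
    ← PySem.List.foldl_append_singleton_eq_map]
  apply PySem.List.foldl_congr_mem
  intro acc k _
  dsimp only
  rw [zero_add, pvMod2, pvDiv2, PySem.List.pyGetD_natCast, pvInnerA]
  by_cases hk : k % 2 = 0 <;> simp [hk, pvEven, List.getD_eq_getElem?_getD]
  intro h2; exfalso; omega

-- B-side canonical pieces
def pvE (w : String) : List String := w.toList.map (fun ch => String.ofList [ch])
def pvFill (v : List String) (r : Int) (row : List String) : List String :=
  (List.range v.length).foldl (fun row j => row.set (2 * j) (pvCellB v j r)) row

-- pass 1, after the first word: plain interleaved extension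
theorem pvAlloc (v : List String) (t : List String) :
    ∀ (g : List (List String)), g ≠ [] →
    t.foldl (fun grid hw =>
        (if grid.isEmpty then grid else grid ++ [List.replicate (2 * v.length - 1) " "]) ++ [pvE hw]) g
      = g ++ t.flatMap (fun w => [pvBlank v, pvE w]) := by
  induction t with
  | nil => intro g _; simp
  | cons b t ih =>
    intro g hg
    simp only [List.foldl_cons, List.isEmpty_eq_false_iff.mpr hg]
    rw [ih _ (by simp)]
    simp [pvBlank]

theorem pvInterleave (v : List String) (t : List String) :
    ∀ (a : String), pvE a :: t.flatMap (fun w => [pvBlank v, pvE w])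
      = (List.range (2 * t.length + 1)).map
          (fun n => if n % 2 = 0 then pvEven (a :: t) (n / 2) else pvBlank v) := by
  induction t with
  | nil => intro a; simp [pvEven, pvE]
  | cons b t ih =>
    intro a
    have hr : List.range (2 * (b :: t).length + 1)
        = 0 :: 1 :: (List.range (2 * t.length + 1)).map (fun n => n + 2) := by
      simp [List.length_cons]
      rw [show 2 * (t.length + 1) + 1 = (2 * t.length + 1) + 1 + 1 by ring]
      rw [List.range_succ_eq_map, List.range_succ_eq_map, List.map_cons, List.map_map]
      simp [Function.comp_def, Nat.succ_eq_add_one]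
    rw [hr]
    simp only [List.flatMap_cons, List.map_cons, List.map_map]
    have h0 : pvEven (a :: b :: t) 0 = pvE a := by simp [pvEven, pvE]
    have hmap : (List.range (2 * t.length + 1)).map
        ((fun n => if n % 2 = 0 then pvEven (a :: b :: t) (n / 2) else pvBlank v) ∘ (fun n => n + 2))
        = (List.range (2 * t.length + 1)).map
          (fun n => if n % 2 = 0 then pvEven (b :: t) (n / 2) else pvBlank v) := by
      apply List.map_congr_left
      intro n _
      simp only [Function.comp_apply]
      have hp : (n + 2) % 2 = n % 2 := by omega
      have hd : (n + 2) / 2 = n / 2 + 1 := by omega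
      rw [hp, hd]
      by_cases hn : n % 2 = 0 <;> simp [hn, pvEven]
    rw [hmap, ← ih b]
    simp [h0]

theorem pvBase (h v : List String) :
    h.foldl (fun grid hw =>
        (if grid.isEmpty then grid else grid ++ [List.replicate (2 * v.length - 1) " "]) ++ [pvE hw]) []
      = (List.range (2 * h.length - 1)).map
          (fun n => if n % 2 = 0 then pvEven h (n / 2) else pvBlank v) := by
  cases h with
  | nil => simp
  | cons a t =>
    rw [List.foldl_cons]
    simp only [List.isEmpty_nil, if_pos, List.nil_append]
    rw [pvAlloc v t [pvE a] (by simp), show 2 * (a :: t).length - 1 = 2 * t.length + 1 by simp; omega,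
      ← pvInterleave v t a]
    simp

theorem pvFillAux_length (v : List String) (r : Int) (m : Nat) :
    ∀ (row : List String),
    ((List.range m).foldl (fun row j => row.set (2 * j) (pvCellB v j r)) row).length
      = row.length := by
  induction m with
  | zero => intro row; simp
  | succ m ih => intro row; rw [List.range_succ, List.foldl_append]; simp [ih]

theorem pvFillAux_getElem? (v : List String) (r : Int) (m : Nat) :
    ∀ (row : List String) (n : Nat),
    ((List.range m).foldl (fun row j => row.set (2 * j) (pvCellB v j r)) row)[n]?
      = if n % 2 = 0 ∧ n < 2 * m ∧ n < row.length then some (pvCellB v (n / 2) r)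
        else row[n]? := by
  induction m with
  | zero => intro row n; simp
  | succ m ih =>
    intro row n
    rw [List.range_succ, List.foldl_append, List.foldl_cons, List.foldl_nil,
      List.getElem?_set, pvFillAux_length, ih]
    by_cases he : 2 * m = n
    · subst he
      have h1 : ¬ (2 * m % 2 = 0 ∧ 2 * m < 2 * m ∧ 2 * m < row.length) := by omega
      rw [show (2 * m) / 2 = m by omega] at *
      by_cases hl : 2 * m < row.length
      · simp [hl, show 2*m % 2 = 0 ∧ 2*m < 2*(m+1) ∧ 2*m < row.length from by omega]
      · rw [if_neg hl, if_neg h1, if_neg (by omega : ¬ (2*m % 2 = 0 ∧ 2*m < 2*(m+1) ∧ 2*m < row.length))]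
        rw [List.getElem?_eq_none (by omega)]
        simp
    · rw [if_neg he]
      congr 1
      rw [eq_iff_iff]; omega

theorem pvFillBlank (v : List String) (r : Int) :
    pvFill v r (pvBlank v) = pvOddRow v r := by
  apply List.ext_getElem?
  intro n
  rw [pvFill, pvFillAux_getElem?, pvBlank, pvOddRow, List.length_replicate]
  by_cases hn : n < 2 * v.length - 1
  · rw [List.getElem?_map, List.getElem?_range hn, List.getElem?_replicate, if_pos hn]
    by_cases hp : n % 2 = 0
    · rw [if_pos (by omega), Option.map_some]
      simp [hp]
    · rw [if_neg (by omega)]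
      simp [hp]
  · have h1 : ((List.range (2 * v.length - 1)).map
        (fun c => if c % 2 = 0 then pvCellB v (c / 2) r else " "))[n]? = none := by
      apply List.getElem?_eq_none; simp; omega
    rw [if_neg (by omega), List.getElem?_replicate, if_neg hn, h1]

theorem pvScatter_getElem? (v : List String) (m : Nat) :
    ∀ (g : List (List String)) (n : Nat),
    ((List.range m).foldl (fun g i => g.modify (2 * i + 1) (pvFill v (2 * (i : Int) + 1))) g)[n]?
      = if n % 2 = 1 ∧ n < 2 * m then (g[n]?).map (pvFill v (n : Int)) else g[n]? := by
  induction m with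
  | zero => intro g n; simp
  | succ m ih =>
    intro g n
    rw [List.range_succ, List.foldl_append, List.foldl_cons, List.foldl_nil,
      List.getElem?_modify, ih]
    by_cases he : 2 * m + 1 = n
    · subst he
      rw [if_neg (by omega), if_pos (by omega)]
      have hc : (2 * (m : Int) + 1) = ((2 * m + 1 : Nat) : Int) := by push_cast; ring
      rw [hc]
      cases g[2 * m + 1]? <;> simp
    · rw [Option.map_eq_map]
      by_cases h2 : n % 2 = 1 ∧ n < 2 * m
      · rw [if_pos h2, if_pos (by omega)]
        cases g[n]? <;> simp [he]
      · rw [if_neg h2, if_neg (by omega)]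
        cases g[n]? <;> simp [he]

theorem B_eq_grid (h v : List String) : makeLetterGrid_alt h v = pvGrid h v := by
  have hB : makeLetterGrid_alt h v
      = (List.range (h.length - 1)).foldl
          (fun g i => g.modify (2 * i + 1) (pvFill v (2 * (i : Int) + 1)))
          (h.foldl (fun grid hw =>
            (if grid.isEmpty then grid
             else grid ++ [List.replicate (2 * (v.length : Int) - 1).toNat " "]) ++ [pvE hw]) []) := rfl
  rw [hB, show (2 * (v.length : Int) - 1).toNat = 2 * v.length - 1 by omega, pvBase h v]
  apply List.ext_getElem?
  intro n
  rw [pvScatter_getElem? v (h.length - 1)]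
  rw [pvGrid]
  by_cases hodd : n % 2 = 1 ∧ n < 2 * (h.length - 1)
  · rw [if_pos hodd]
    have hn : n < 2 * h.length - 1 := by omega
    rw [List.getElem?_map, List.getElem?_range hn, List.getElem?_map, List.getElem?_range hn]
    simp only [Option.map_some]
    rw [if_neg (by omega : ¬ n % 2 = 0), if_neg (by omega : ¬ n % 2 = 0), pvFillBlank]
  · rw [if_neg hodd]
    by_cases hn : n < 2 * h.length - 1
    · rw [List.getElem?_map, List.getElem?_range hn, List.getElem?_map, List.getElem?_range hn]
      have h0 : n % 2 = 0 := by omega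
      simp only [Option.map_some]
      rw [if_pos h0, if_pos h0]
    · rw [List.getElem?_eq_none (by simp; omega), List.getElem?_eq_none (by simp; omega)]

theorem makeLetterGrid_unconditional' (h v : List String) :
    makeLetterGrid h v = makeLetterGrid_alt h v :=
  (A_eq_grid h v).trans (B_eq_grid h v).symm

-- ===== VERDICT (by name: the statement is the Claim_ definition above) =====
theorem makeLetterGrid_spec : Claim_equal_makeLetterGrid := by
  intro h v _ _
  exact makeLetterGrid_unconditional' h v
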